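-- pv_equiv track=rewrite | github.com/liliw-w/HW | homework-0-template/egyptian.py | egyptian_multiplication
-- ===== SOURCE A (Python) =====
-- def isodd(n):
--     """
--     returns True if n is odd
--     """
--     return n & 0x1 == 1
--
-- def egyptian_multiplication(a, n):
--     """
--     returns the product a * n
--
--     assume n is a nonegative integer
--     """
--     if n == 1:
--         return a
--     if n == 0:
--         return 0
--
--     if isodd(n):
--         return egyptian_multiplication(a + a, n // 2) + a
--     else:
--         return egyptian_multiplication(a + a, n // 2)
-- ===== SOURCE B (Python) =====
-- def egyptian_multiplication(a, n):
--     """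
--     returns the product a * n
--
--     assume n is a nonegative integer
--     """
--     result = 0
--     while n != 0:
--         if n & 1:
--             result += a
--         a += a
--         n //= 2
--     return result
-- ===== Notes on version B (the rewrite author's own statement) =====
-- stated objective: alternative
-- what changed: The doubling/halving recursion is unrolled into an iterative while-loop with a result accumulator (no call stack).
import Mathlib
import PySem

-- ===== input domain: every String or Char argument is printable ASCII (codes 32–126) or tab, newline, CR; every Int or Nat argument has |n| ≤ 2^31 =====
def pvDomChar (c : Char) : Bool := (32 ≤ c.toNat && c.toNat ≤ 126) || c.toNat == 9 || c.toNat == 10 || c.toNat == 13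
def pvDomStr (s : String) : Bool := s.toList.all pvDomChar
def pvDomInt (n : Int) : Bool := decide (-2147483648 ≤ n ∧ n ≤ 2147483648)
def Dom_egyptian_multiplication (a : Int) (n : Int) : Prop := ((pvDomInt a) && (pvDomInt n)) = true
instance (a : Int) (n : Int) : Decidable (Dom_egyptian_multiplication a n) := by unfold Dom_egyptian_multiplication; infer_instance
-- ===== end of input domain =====

-- B unrolls A's doubling/halving recursion into an iterative accumulator loop; equivalence proved for n ≥ 0 (neither program returns for n < 0).

-- ===== PORT A =====
-- Python 'n & 0x1 == 1'; Int.land is Python's & on integers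
def isodd (n : Int) : Bool := (Int.land n 1) == 1

-- literal port of A's recursion; the 'n < 0' guard only makes the (divergent-in-Python) case total, it is outside Pre_
def egyptian_multiplication (a : Int) (n : Int) : Int :=
  if n = 1 then a
  else if n = 0 then 0
  else if n < 0 then 0
  else if isodd n then egyptian_multiplication (a + a) (PySem.Int.floordiv n 2) + a
  else egyptian_multiplication (a + a) (PySem.Int.floordiv n 2)
termination_by n.toNat
decreasing_by
  all_goals
    rw [PySem.Int.floordiv_eq_ediv_of_pos (by omega)]
    omega

-- ===== PORT B =====
-- literal port of B's 'while n != 0' loop; the 'n < 0' guard only makes the (divergent-in-Python) case total, it is outside Pre_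
def egyptian_multiplication_alt_loop (result : Int) (a : Int) (n : Int) : Int :=
  if n < 0 then result
  else if n ≠ 0 then
    egyptian_multiplication_alt_loop (if isodd n then result + a else result) (a + a) (PySem.Int.floordiv n 2)
  else result
termination_by n.toNat
decreasing_by
  rw [PySem.Int.floordiv_eq_ediv_of_pos (by omega)]
  omega

def egyptian_multiplication_alt (a : Int) (n : Int) : Int :=
  egyptian_multiplication_alt_loop 0 a n

-- ===== PRECONDITION & SPEC =====
-- A recurses without a base case for negative n (RecursionError in Python), so Pre_ requires n ≥ 0.
def Pre_egyptian_multiplication (a : Int) (n : Int) : Prop := 0 ≤ n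
instance (a : Int) (n : Int) : Decidable (Pre_egyptian_multiplication a n) := by unfold Pre_egyptian_multiplication; infer_instance
def pvWitness_egyptian_multiplication : Int × Int := (3, 5)

def Spec_egyptian_multiplication (a : Int) (n : Int) (out : Int) : Prop := out = egyptian_multiplication_alt a n
instance (a : Int) (n : Int) (out : Int) : Decidable (Spec_egyptian_multiplication a n out) := by unfold Spec_egyptian_multiplication; infer_instance

-- ===== CLAIM (what is proved, stated in full; the proofs are below) =====
def Claim_equal_egyptian_multiplication : Prop := ∀ (a : Int) (n : Int), Dom_egyptian_multiplication a n → Pre_egyptian_multiplication a n → Spec_egyptian_multiplication a n (egyptian_multiplication a n)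

-- ===== LEMMAS AND PROOFS =====

-- for nonnegative n, the parity test n &&& 1 == 1 is the test n % 2 = 1
lemma isodd_eq_emod (n : Int) (h : 0 ≤ n) : isodd n = decide (n % 2 = 1) := by
  obtain ⟨m, rfl⟩ := Int.eq_ofNat_of_zero_le h
  show ((Int.land (Int.ofNat m) (Int.ofNat 1)) == 1) = _
  rw [show Int.land (Int.ofNat m) (Int.ofNat 1) = Int.ofNat (m &&& 1) from rfl,
    Nat.and_one_is_mod]
  rcases Nat.mod_two_eq_zero_or_one m with hm | hm <;>
    simp [hm, Int.ofNat_eq_natCast] <;> omega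

lemma egyptian_multiplication_eq_mul (a n : Int) (h : 0 ≤ n) :
    egyptian_multiplication a n = a * n := by
  generalize hk : n.toNat = k
  induction k using Nat.strong_induction_on generalizing a n with
  | _ k ih =>
    rw [egyptian_multiplication]
    split_ifs with h1 h0 hneg hodd
    · rw [h1]; ring
    · rw [h0]; ring
    · omega
    · rw [PySem.Int.floordiv_eq_ediv_of_pos (by omega),
        ih ((n/2).toNat) (by omega) _ _ (by omega) rfl]
      rw [isodd_eq_emod n h] at hodd
      simp at hodd
      have h2 : n / 2 * 2 + 1 = n := by omega
      linear_combination a * h2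
    · rw [PySem.Int.floordiv_eq_ediv_of_pos (by omega),
        ih ((n/2).toNat) (by omega) _ _ (by omega) rfl]
      rw [isodd_eq_emod n h] at hodd
      simp at hodd
      have h2 : n / 2 * 2 = n := by omega
      linear_combination a * h2

lemma egyptian_multiplication_alt_loop_eq (result a n : Int) (h : 0 ≤ n) :
    egyptian_multiplication_alt_loop result a n = result + a * n := by
  generalize hk : n.toNat = k
  induction k using Nat.strong_induction_on generalizing result a n with
  | _ k ih =>
    rw [egyptian_multiplication_alt_loop]
    rw [if_neg (by omega)]
    by_cases hz : n = 0
    · simp [hz]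
    · rw [if_pos hz, PySem.Int.floordiv_eq_ediv_of_pos (by omega),
        ih ((n/2).toNat) (by omega) _ _ _ (by omega) rfl,
        isodd_eq_emod n (by omega)]
      by_cases hodd : n % 2 = 1
      · simp only [hodd, decide_true, if_true]
        have h2 : n / 2 * 2 + 1 = n := by omega
        linear_combination a * h2
      · simp only [hodd, decide_false, Bool.false_eq_true, if_false]
        have h2 : n / 2 * 2 = n := by omega
        linear_combination a * h2

-- ===== VERDICT (by name: the statement is the Claim_ definition above) =====
theorem egyptian_multiplication_spec : Claim_equal_egyptian_multiplication := by
  intro a n _ hpre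
  unfold Spec_egyptian_multiplication egyptian_multiplication_alt
  rw [egyptian_multiplication_eq_mul a n hpre,
    egyptian_multiplication_alt_loop_eq 0 a n hpre]
  ring
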